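-- pv_equiv track=rewrite | github.com/mupoese/AI-Interlinq | scripts/code_sync.py | _apply_conflict_resolution_strategies
-- ===== SOURCE A (Python) =====
-- def _apply_conflict_resolution_strategies(content: str, file_path: str) -> str:
--     """Apply automated conflict resolution strategies."""
--     # This is a simplified conflict resolution
--     # In production, you'd want more sophisticated strategies
--
--     lines = content.split('\n')
--     resolved_lines = []
--     in_conflict = False
--     conflict_start = -1
--
--     for i, line in enumerate(lines):
--         if line.startswith('<<<<<<<'):
--             in_conflict = True
--             conflict_start = i
--             continue
--         elif line.startswith('======='):
--             if in_conflict: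
--                 continue
--         elif line.startswith('>>>>>>>'):
--             if in_conflict:
--                 in_conflict = False
--                 # Simple strategy: prefer the incoming changes for certain file types
--                 if file_path.endswith('.md') or file_path.endswith('.txt'):
--                     # For documentation, prefer incoming changes
--                     pass  # We've already skipped the local version
--                 else:
--                     # For code files, this is more complex and risky
--                     # Return original content to indicate we can't auto-resolve
--                     return content
--             continue
--         elif not in_conflict:
--             resolved_lines.append(line)
--
--     return '\n'.join(resolved_lines)
-- ===== SOURCE B (Python) =====
-- def _apply_conflict_resolution_strategies(content: str, file_path: str) -> str:
--     """Two-phase rewrite: first decide whether auto-resolution is allowed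
--     (code files bail out verbatim on any closed conflict), then strip
--     markers and conflict bodies in a separate filtering pass."""
--     lines = content.split('\n')
--     is_doc = file_path.endswith('.md') or file_path.endswith('.txt')
--     if not is_doc:
--         opened = False
--         for line in lines:
--             if line.startswith('<<<<<<<'):
--                 opened = True
--             elif line.startswith('>>>>>>>') and opened:
--                 return content
--     result = []
--     in_conflict = False
--     for line in lines:
--         if line.startswith('<<<<<<<'):
--             in_conflict = True
--         elif line.startswith('>>>>>>>'):
--             in_conflict = False
--         elif not line.startswith('=======') and not in_conflict:
--             result.append(line)
--     return '\n'.join(result)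
-- ===== Notes on version B (the rewrite author's own statement) =====
-- stated objective: simpler
-- what changed: A's single stateful loop with an early return buried in the '>>>>>>>' branch is split into two independent passes: a pre-scan that decides whether a code file must be returned verbatim (any closed conflict), then a pure filtering pass that drops markers and conflict bodies.
import Mathlib
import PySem

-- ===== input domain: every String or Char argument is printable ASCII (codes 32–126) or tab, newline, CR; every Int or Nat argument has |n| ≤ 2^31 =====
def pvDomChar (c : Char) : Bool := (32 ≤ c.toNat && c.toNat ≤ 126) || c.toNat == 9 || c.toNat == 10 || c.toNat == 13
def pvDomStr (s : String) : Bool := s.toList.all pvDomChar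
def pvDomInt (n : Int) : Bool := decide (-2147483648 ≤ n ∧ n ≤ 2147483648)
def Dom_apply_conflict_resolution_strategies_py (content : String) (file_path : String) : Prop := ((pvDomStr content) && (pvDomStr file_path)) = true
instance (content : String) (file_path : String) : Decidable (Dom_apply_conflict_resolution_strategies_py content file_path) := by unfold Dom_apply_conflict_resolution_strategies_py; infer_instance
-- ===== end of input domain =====

-- B replaces A's single stateful loop (with an early return buried in one branch) by two
-- independent passes: a pre-scan deciding whether a code file is returned verbatim, then a
-- pure marker/conflict-body filter (objective: simpler decomposition, same cost).

-- ===== PORT A =====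
-- One loop over the lines with state (in_conflict, accumulated lines); `none` models the early
-- `return content` in the '>>>>>>>' branch for non-doc files. (The Python's `i`/`conflict_start`
-- are never read and carry no behaviour.) Lines are List Char (PySem.Chars is exact here).
def pvAGo (fp : List Char) : List (List Char) → Bool → List (List Char) → Option (List (List Char))
  | [], _, acc => some acc.reverse
  | l :: rest, inC, acc =>
    if PySem.Chars.startswith l "<<<<<<<".toList then
      pvAGo fp rest true acc
    else if PySem.Chars.startswith l "=======".toList then
      -- in_conflict: continue; otherwise the elif chain ends without appending — dropped either way
      pvAGo fp rest inC acc
    else if PySem.Chars.startswith l ">>>>>>>".toList then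
      if inC then
        if PySem.Chars.endswith fp ".md".toList || PySem.Chars.endswith fp ".txt".toList then
          pvAGo fp rest false acc
        else
          none                      -- return content
      else
        pvAGo fp rest inC acc
    else if !inC then
      pvAGo fp rest inC (l :: acc)
    else
      pvAGo fp rest inC acc

def apply_conflict_resolution_strategies_py (content : String) (file_path : String) : String :=
  match pvAGo file_path.toList (PySem.Chars.splitOn content.toList ['\n']) false [] with
  | none => content
  | some ls => String.ofList (PySem.Chars.join ['\n'] ls)

-- ===== PORT B =====
-- pre-scan: does some conflict close? (then a code file cannot be auto-resolved)
def pvBScan : List (List Char) → Bool → Bool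
  | [], _ => false
  | l :: rest, opened =>
    if PySem.Chars.startswith l "<<<<<<<".toList then pvBScan rest true
    else if PySem.Chars.startswith l ">>>>>>>".toList && opened then true
    else pvBScan rest opened

-- filter pass: drop markers and conflict bodies
def pvBFilter : List (List Char) → Bool → List (List Char)
  | [], _ => []
  | l :: rest, inC =>
    if PySem.Chars.startswith l "<<<<<<<".toList then pvBFilter rest true
    else if PySem.Chars.startswith l ">>>>>>>".toList then pvBFilter rest false
    else if !PySem.Chars.startswith l "=======".toList && !inC then l :: pvBFilter rest inC
    else pvBFilter rest inC

def apply_conflict_resolution_strategies_py_alt (content : String) (file_path : String) : String :=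
  let lines := PySem.Chars.splitOn content.toList ['\n']
  let is_doc := PySem.Chars.endswith file_path.toList ".md".toList || PySem.Chars.endswith file_path.toList ".txt".toList
  if !is_doc && pvBScan lines false then content
  else String.ofList (PySem.Chars.join ['\n'] (pvBFilter lines false))

-- ===== PRECONDITION & SPEC =====
def Spec_apply_conflict_resolution_strategies_py (content : String) (file_path : String) (out : String) : Prop := out = apply_conflict_resolution_strategies_py_alt content file_path
instance (content : String) (file_path : String) (out : String) : Decidable (Spec_apply_conflict_resolution_strategies_py content file_path out) := by unfold Spec_apply_conflict_resolution_strategies_py; infer_instance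

-- ===== CLAIM (what is proved, stated in full; the proofs are below) =====
def Claim_equal_apply_conflict_resolution_strategies_py : Prop := ∀ (content : String) (file_path : String), Dom_apply_conflict_resolution_strategies_py content file_path → Spec_apply_conflict_resolution_strategies_py content file_path (apply_conflict_resolution_strategies_py content file_path)

-- ===== LEMMAS AND PROOFS =====

-- a line cannot start with two different marker heads
theorem pv_not_both (l : List Char) (h2 : PySem.Chars.startswith l ['=','=','=','=','=','=','='] = true)
    (h3 : PySem.Chars.startswith l ['>','>','>','>','>','>','>'] = true) : False := by
  rw [PySem.Chars.startswith_iff] at h2 h3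
  obtain ⟨t2, e2⟩ := h2
  obtain ⟨t3, e3⟩ := h3
  rw [← e2] at e3
  simp at e3

-- doc files: the loop never bails, so it computes exactly B's filter pass
theorem pvAGo_doc (fp : List Char)
    (hdoc : (PySem.Chars.endswith fp ['.','m','d'] || PySem.Chars.endswith fp ['.','t','x','t']) = true) :
    ∀ (lines : List (List Char)) (inC : Bool) (acc : List (List Char)),
      pvAGo fp lines inC acc = some (acc.reverse ++ pvBFilter lines inC) := by
  intro lines
  induction lines with
  | nil => intro inC acc; simp [pvAGo, pvBFilter]
  | cons l rest ih =>
    intro inC acc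
    simp only [pvAGo, pvBFilter]
    by_cases h1 : PySem.Chars.startswith l ['<','<','<','<','<','<','<'] = true
    · simp [h1, ih]
    · by_cases h2 : PySem.Chars.startswith l ['=','=','=','=','=','=','='] = true
      · by_cases h3 : PySem.Chars.startswith l ['>','>','>','>','>','>','>'] = true
        · exact (pv_not_both l h2 h3).elim
        · simp [h1, h2, h3, ih]
      · by_cases h3 : PySem.Chars.startswith l ['>','>','>','>','>','>','>'] = true
        · cases inC <;> simp [h1, h2, h3, hdoc, ih]
        · cases inC <;> simp [h1, h2, h3, ih]

-- code files: the loop bails exactly when B's pre-scan fires, else computes the filter pass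
theorem pvAGo_code (fp : List Char)
    (hdoc : (PySem.Chars.endswith fp ['.','m','d'] || PySem.Chars.endswith fp ['.','t','x','t']) = false) :
    ∀ (lines : List (List Char)) (inC : Bool) (acc : List (List Char)),
      pvAGo fp lines inC acc =
        if pvBScan lines inC then none else some (acc.reverse ++ pvBFilter lines inC) := by
  intro lines
  induction lines with
  | nil => intro inC acc; simp [pvAGo, pvBScan, pvBFilter]
  | cons l rest ih =>
    intro inC acc
    simp only [pvAGo, pvBScan, pvBFilter]
    by_cases h1 : PySem.Chars.startswith l ['<','<','<','<','<','<','<'] = true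
    · simp [h1, ih]
    · by_cases h3 : PySem.Chars.startswith l ['>','>','>','>','>','>','>'] = true
      · by_cases h2 : PySem.Chars.startswith l ['=','=','=','=','=','=','='] = true
        · exact (pv_not_both l h2 h3).elim
        · cases inC <;> simp [h1, h2, h3, hdoc, ih]
      · by_cases h2 : PySem.Chars.startswith l ['=','=','=','=','=','=','='] = true
        · simp [h1, h2, h3, ih]
        · cases inC <;> simp [h1, h2, h3, ih]

-- ===== VERDICT (by name: the statement is the Claim_ definition above) =====
theorem apply_conflict_resolution_strategies_py_spec : Claim_equal_apply_conflict_resolution_strategies_py := by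
  intro content file_path _
  unfold Spec_apply_conflict_resolution_strategies_py
  unfold apply_conflict_resolution_strategies_py apply_conflict_resolution_strategies_py_alt
  by_cases hdoc : (PySem.Chars.endswith file_path.toList ['.','m','d'] || PySem.Chars.endswith file_path.toList ['.','t','x','t']) = true
  · rw [pvAGo_doc file_path.toList hdoc]
    simp [hdoc]
  · rw [pvAGo_code file_path.toList (by simpa using hdoc)]
    simp only [Bool.not_eq_true] at hdoc
    by_cases hs : pvBScan (PySem.Chars.splitOn content.toList ['\n']) false = true
    · simp [hdoc, hs]
    · simp [hdoc, hs]
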